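-- pv_equiv track=rewrite | github.com/sebastianiv21/logpilot | backend/app/services/export.py | _wrap_pre_lines
-- ===== SOURCE A (Python) =====
-- _PRE_WRAP_SPLIT_CHARS = frozenset(" :.,;/-\\()[]{}")
--
-- def _wrap_pre_lines(text: str, max_len: int = 78) -> str:
--     """Wrap long lines in preformatted text to avoid PDF overflow and ReportLab CPU hang.
--
--     ReportLab's Preformatted with maxLineLength can be very slow or hang on large
--     reports with long lines. We do a single-pass wrap here and pass the result
--     without maxLineLength.
--     """
--     if not text or max_len < 1:
--         return text
--     lines = text.split("\n")
--     out: list[str] = []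
--     for line in lines:
--         if len(line) <= max_len:
--             out.append(line)
--             continue
--         pos = 0
--         while pos < len(line):
--             chunk = line[pos : pos + max_len]
--             if len(chunk) < max_len:
--                 out.append(chunk)
--                 break
--             # Prefer break at last occurrence of a split char in this chunk
--             break_at = -1
--             for i in range(len(chunk) - 1, -1, -1):
--                 if chunk[i] in _PRE_WRAP_SPLIT_CHARS:
--                     break_at = i
--                     break
--             if break_at >= 0:
--                 out.append(chunk[: break_at + 1].rstrip())
--                 pos += break_at + 1
--                 # Skip leading spaces on continuation
--                 while pos < len(line) and line[pos] == " ":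
--                     pos += 1
--             else:
--                 out.append(chunk)
--                 pos += max_len
--     return "\n".join(out)
-- ===== SOURCE B (Python) =====
-- _PRE_WRAP_SPLIT_CHARS = frozenset(" :.,;/-\\()[]{}")
--
--
-- def _wrap_pre_lines(text: str, max_len: int = 78) -> str:
--     """Single left-to-right pass per long line: track the last break char seen
--     in the current window instead of re-scanning each chunk backward."""
--     if not text or max_len < 1:
--         return text
--     out = []
--     for line in text.split("\n"):
--         n = len(line)
--         if n <= max_len:
--             out.append(line)
--             continue
--         start = 0
--         last_break = -1
--         i = 0
--         while i < n:
--             if line[i] in _PRE_WRAP_SPLIT_CHARS: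
--                 last_break = i
--             if i - start + 1 == max_len:
--                 if last_break >= 0:
--                     out.append(line[start:last_break + 1].rstrip())
--                     start = last_break + 1
--                     while start < n and line[start] == " ":
--                         start += 1
--                     last_break = -1
--                     if start > i + 1:
--                         i = start - 1
--                 else:
--                     out.append(line[start:i + 1])
--                     start = i + 1
--             i += 1
--         if start < n:
--             out.append(line[start:])
--     return "\n".join(out)
-- ===== Notes on version B (the rewrite author's own statement) =====
-- stated objective: alternative
-- what changed: Replaces A's per-window chunk slicing with a backward re-scan for the last break char by a single left-to-right scan per line that maintains a last-seen break index and emits a chunk whenever the window fills.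
import Mathlib
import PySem

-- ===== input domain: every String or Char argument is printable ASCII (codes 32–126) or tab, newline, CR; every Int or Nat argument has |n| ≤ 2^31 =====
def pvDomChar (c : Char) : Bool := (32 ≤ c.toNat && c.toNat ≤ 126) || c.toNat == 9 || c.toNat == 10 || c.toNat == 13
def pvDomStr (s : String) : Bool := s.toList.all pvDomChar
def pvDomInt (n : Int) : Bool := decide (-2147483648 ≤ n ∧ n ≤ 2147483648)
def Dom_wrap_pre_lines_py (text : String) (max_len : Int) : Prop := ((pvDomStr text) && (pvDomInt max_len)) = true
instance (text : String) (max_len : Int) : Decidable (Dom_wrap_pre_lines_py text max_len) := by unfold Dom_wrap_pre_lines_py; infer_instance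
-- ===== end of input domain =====

-- B wraps long lines in ONE left-to-right pass per line (tracking the last break char seen)
-- instead of A's backward re-scan of each max_len chunk; return values proved equal everywhere.

-- ===== PORT A =====

-- _PRE_WRAP_SPLIT_CHARS
def pvSplitChars : List Char := " :.,;/-\\()[]{}".toList

-- shared by both Pythons: the 'while pos < len(line) and line[pos] == " ": pos += 1' loop
def pvSkipSpaces (line : List Char) (pos : Nat) : Nat :=
  if h : pos < line.length ∧ line.getD pos ' ' = ' ' then pvSkipSpaces line (pos + 1) else pos
termination_by line.length - pos
decreasing_by omega

theorem pvSkipSpaces_ge (line : List Char) (pos : Nat) : pos ≤ pvSkipSpaces line pos := by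
  fun_induction pvSkipSpaces line pos with
  | _ => omega

-- A's inner 'for i in range(len(chunk)-1, -1, -1): if chunk[i] in …: break_at = i; break'
-- (j = number of indices still to inspect, scanning downward from j-1)
def pvLastBreakA (chunk : List Char) : Nat → Int
  | 0 => -1
  | j + 1 => if pvSplitChars.contains (chunk.getD j ' ') then (j : Int) else pvLastBreakA chunk j

-- A's 'while pos < len(line)' loop for one long line (0 < m holds at every call site: max_len ≥ 1)
def pvWrapLineA (line : List Char) (m : Nat) (hm : 0 < m) (pos : Nat) : List (List Char) :=
  if _hp : pos < line.length then
    let chunk := PySem.List.slice line (some (pos : Int)) (some ((pos : Int) + (m : Int)))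
    if chunk.length < m then [chunk]
    else
      let breakAt := pvLastBreakA chunk chunk.length
      if hb : 0 ≤ breakAt then
        PySem.Chars.rstrip (PySem.List.slice chunk none (some (breakAt + 1)))
          :: pvWrapLineA line m hm (pvSkipSpaces line (pos + breakAt.toNat + 1))
      else
        chunk :: pvWrapLineA line m hm (pos + m)
  else []
termination_by line.length - pos
decreasing_by
  · have h1 := pvSkipSpaces_ge line
      (pos + (pvLastBreakA (PySem.List.slice line (some (pos : Int)) (some ((pos : Int) + (m : Int))))
        (PySem.List.slice line (some (pos : Int)) (some ((pos : Int) + (m : Int)))).length).toNat + 1)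
    omega
  · omega

def wrap_pre_lines_py (text : String) (max_len : Int) : String :=
  if h : text = "" ∨ max_len < 1 then text
  else
    let lines := (PySem.Chars.split? text.toList ['\n']).getD []
    let out := lines.foldl (fun acc line =>
      if (line.length : Int) ≤ max_len then acc ++ [line]
      else acc ++ pvWrapLineA line max_len.toNat (by omega) 0) []
    String.ofList (PySem.Chars.join ['\n'] out)

-- ===== PORT B =====

-- B's single 'while i < n' pass for one long line: state (start, last_break, i)
def pvWrapLineB (line : List Char) (m : Nat) (hm : 0 < m) (start : Nat) (lastBreak : Int) (i : Nat) :
    List (List Char) :=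
  if hi : i < line.length then
    let lb := if pvSplitChars.contains (line.getD i ' ') then (i : Int) else lastBreak
    if i - start + 1 = m then
      if hb : 0 ≤ lb then
        let start' := pvSkipSpaces line (lb.toNat + 1)
        PySem.Chars.rstrip (PySem.List.slice line (some (start : Int)) (some (lb + 1)))
          :: pvWrapLineB line m hm start' (-1) ((if i + 1 < start' then start' - 1 else i) + 1)
      else
        PySem.List.slice line (some (start : Int)) (some ((i : Int) + 1))
          :: pvWrapLineB line m hm (i + 1) lb (i + 1)
    else pvWrapLineB line m hm start lb (i + 1)
  else if start < line.length then [PySem.List.slice line (some (start : Int)) none] else []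
termination_by line.length - i
decreasing_by
  · split <;> split <;> omega
  · omega
  · omega

def wrap_pre_lines_py_alt (text : String) (max_len : Int) : String :=
  if h : text = "" ∨ max_len < 1 then text
  else
    let lines := (PySem.Chars.split? text.toList ['\n']).getD []
    let out := lines.foldl (fun acc line =>
      if (line.length : Int) ≤ max_len then acc ++ [line]
      else acc ++ pvWrapLineB line max_len.toNat (by omega) 0 (-1) 0) []
    String.ofList (PySem.Chars.join ['\n'] out)

-- ===== PRECONDITION & SPEC =====
def Spec_wrap_pre_lines_py (text : String) (max_len : Int) (out : String) : Prop := out = wrap_pre_lines_py_alt text max_len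
instance (text : String) (max_len : Int) (out : String) : Decidable (Spec_wrap_pre_lines_py text max_len out) := by unfold Spec_wrap_pre_lines_py; infer_instance

-- ===== CLAIM (what is proved, stated in full; the proofs are below) =====
def Claim_equal_wrap_pre_lines_py : Prop := ∀ (text : String) (max_len : Int), Dom_wrap_pre_lines_py text max_len → Spec_wrap_pre_lines_py text max_len (wrap_pre_lines_py text max_len)

-- ===== LEMMAS AND PROOFS =====

-- proof-only helpers
def pvNoBreak (line : List Char) (a b : Nat) : Prop :=
  ∀ t, a ≤ t → t < b → pvSplitChars.contains (line.getD t ' ') = false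

def pvInv (line : List Char) (pos k : Nat) (lb : Int) : Prop :=
  (lb = -1 ∧ pvNoBreak line pos (pos + k)) ∨
  (∃ b : Nat, lb = (b : Int) ∧ pos ≤ b ∧ b < pos + k ∧
    pvSplitChars.contains (line.getD b ' ') = true ∧ pvNoBreak line (b + 1) (pos + k))

theorem pvLastBreakA_eq (chunk : List Char) (j : Nat) (x : Int)
    (hx : (x = -1 ∧ ∀ t, t < j → pvSplitChars.contains (chunk.getD t ' ') = false) ∨
          (∃ b : Nat, x = (b : Int) ∧ b < j ∧ pvSplitChars.contains (chunk.getD b ' ') = true ∧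
            ∀ t, b < t → t < j → pvSplitChars.contains (chunk.getD t ' ') = false)) :
    pvLastBreakA chunk j = x := by
  induction j with
  | zero =>
    rcases hx with ⟨h1, _⟩ | ⟨b, _, hlt, _, _⟩
    · rw [pvLastBreakA, h1]
    · omega
  | succ j ih =>
    rw [pvLastBreakA]
    rcases hx with ⟨h1, h2⟩ | ⟨b, hb, hlt, hbrk, hno⟩
    · rw [if_neg (fun hc => by rw [h2 j (by omega)] at hc; exact Bool.false_ne_true hc)]
      exact ih (Or.inl ⟨h1, fun t ht => h2 t (by omega)⟩)
    · by_cases hj : b = j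
      · subst hj; rw [if_pos hbrk]; exact hb.symm
      · rw [if_neg (fun hc => by rw [hno j (by omega) (by omega)] at hc; exact Bool.false_ne_true hc)]
        exact ih (Or.inr ⟨b, hb, by omega, hbrk, fun t h1 h2 => hno t h1 (by omega)⟩)

theorem pvGetD_chunk (line : List Char) (pos m t : Nat) (ht : t < m) :
    ((line.drop pos).take m).getD t ' ' = line.getD (pos + t) ' ' := by
  simp [List.getD, ht, List.getElem?_drop]
theorem pvChunk_eq (line : List Char) (pos m : Nat) :
    PySem.List.slice line (some (pos : Int)) (some ((pos : Int) + (m : Int)))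
      = (line.drop pos).take m := by
  rw [show ((pos : Int) + (m : Int)) = (((pos + m : Nat)) : Int) by push_cast; ring,
    PySem.List.slice_natCast]
  congr 1
  omega

theorem pvWrapB_tail (line : List Char) (m : Nat) (hm : 0 < m) (pos k : Nat) (lb : Int)
    (hk : k + 1 ≤ m) (hge : line.length ≤ pos + k) :
    pvWrapLineB line m hm pos lb (pos + k) = pvWrapLineA line m hm pos := by
  rw [pvWrapLineB, pvWrapLineA, dif_neg (by omega)]
  by_cases hp : pos < line.length
  · rw [if_pos hp, dif_pos hp]
    have hch : PySem.List.slice line (some (pos : Int)) (some ((pos : Int) + (m : Int)))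
        = line.drop pos := by
      rw [pvChunk_eq]
      exact List.take_of_length_le (by simp; omega)
    rw [if_pos (by rw [hch]; simp; omega), hch, PySem.List.slice_from_natCast]
  · rw [if_neg hp, dif_neg hp]
theorem pvWrapA_step_break (line : List Char) (m : Nat) (hm : 0 < m) (pos b : Nat)
    (hlen : pos + m ≤ line.length) (hb1 : pos ≤ b) (hb2 : b < pos + m)
    (hbrk : pvSplitChars.contains (line.getD b ' ') = true)
    (hno : pvNoBreak line (b + 1) (pos + m)) :
    pvWrapLineA line m hm pos
      = PySem.Chars.rstrip ((line.drop pos).take (b - pos + 1))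
        :: pvWrapLineA line m hm (pvSkipSpaces line (b + 1)) := by
  rw [pvWrapLineA, dif_pos (by omega : pos < line.length)]
  dsimp only
  rw [pvChunk_eq line pos m]
  have hclen : ((line.drop pos).take m).length = m := by simp; omega
  rw [if_neg (by rw [hclen]; omega)]
  have hbA : pvLastBreakA ((line.drop pos).take m) ((line.drop pos).take m).length
      = ((b - pos : Nat) : Int) := by
    rw [hclen]
    apply pvLastBreakA_eq
    refine Or.inr ⟨b - pos, rfl, by omega, ?_, ?_⟩
    · rw [pvGetD_chunk line pos m (b - pos) (by omega)]
      rw [show pos + (b - pos) = b by omega]; exact hbrk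
    · intro t h1 h2
      rw [pvGetD_chunk line pos m t h2]
      exact hno (pos + t) (by omega) (by omega)
  rw [hbA, dif_pos (by omega : (0:Int) ≤ ((b - pos : Nat) : Int))]
  congr 1
  · congr 1
    rw [show ((b - pos : Nat) : Int) + 1 = (((b - pos + 1 : Nat)) : Int) by push_cast; ring]
    rw [PySem.List.slice_to _ (by omega)]
    rw [Int.toNat_natCast, List.take_take]
    congr 1; omega
  · congr 1
    rw [Int.toNat_natCast]
    congr 1; omega

theorem pvWrapA_step_nobreak (line : List Char) (m : Nat) (hm : 0 < m) (pos : Nat)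
    (hlen : pos + m ≤ line.length)
    (hno : pvNoBreak line pos (pos + m)) :
    pvWrapLineA line m hm pos
      = (line.drop pos).take m :: pvWrapLineA line m hm (pos + m) := by
  rw [pvWrapLineA, dif_pos (by omega : pos < line.length)]
  dsimp only
  rw [pvChunk_eq line pos m]
  have hclen : ((line.drop pos).take m).length = m := by simp; omega
  rw [if_neg (by rw [hclen]; omega)]
  have hbA : pvLastBreakA ((line.drop pos).take m) ((line.drop pos).take m).length
      = (-1 : Int) := by
    rw [hclen]
    apply pvLastBreakA_eq
    refine Or.inl ⟨rfl, ?_⟩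
    intro t ht
    rw [pvGetD_chunk line pos m t ht]
    exact hno (pos + t) (by omega) (by omega)
  rw [hbA, dif_neg (by omega : ¬ (0:Int) ≤ -1)]
theorem pvInv_step (line : List Char) (pos k : Nat) (lb : Int) (hinv : pvInv line pos k lb) :
    pvInv line pos (k + 1)
      (if pvSplitChars.contains (line.getD (pos + k) ' ') then ((pos + k : Nat) : Int) else lb) := by
  by_cases hc : pvSplitChars.contains (line.getD (pos + k) ' ') = true
  · rw [if_pos hc]
    exact Or.inr ⟨pos + k, rfl, by omega, by omega, hc, fun t h1 h2 => absurd h2 (by omega)⟩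
  · rw [if_neg hc]
    have hcf : pvSplitChars.contains (line.getD (pos + k) ' ') = false :=
      Bool.not_eq_true _ ▸ (Bool.eq_false_iff.mpr hc)
    rcases hinv with ⟨h1, h2⟩ | ⟨b, hb, hb1, hb2, hb3, hb4⟩
    · refine Or.inl ⟨h1, fun t h1' h2' => ?_⟩
      rcases Nat.lt_or_ge t (pos + k) with h | h
      · exact h2 t h1' h
      · rw [show t = pos + k by omega]; exact hcf
    · refine Or.inr ⟨b, hb, hb1, by omega, hb3, fun t h1' h2' => ?_⟩
      rcases Nat.lt_or_ge t (pos + k) with h | h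
      · exact hb4 t h1' h
      · rw [show t = pos + k by omega]; exact hcf

theorem pvWrapB_eq_A (line : List Char) (m : Nat) (hm : 0 < m) :
    ∀ (N pos k : Nat) (lb : Int), line.length - (pos + k) ≤ N → k + 1 ≤ m → pvInv line pos k lb →
      pvWrapLineB line m hm pos lb (pos + k) = pvWrapLineA line m hm pos := by
  intro N
  induction N with
  | zero =>
    intro pos k lb hN hk _
    exact pvWrapB_tail line m hm pos k lb hk (by omega)
  | succ N ih =>
    intro pos k lb hN hk hinv
    by_cases hi : pos + k < line.length
    · have hinv' := pvInv_step line pos k lb hinv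
      rw [pvWrapLineB, dif_pos hi]
      dsimp only
      by_cases hfull : pos + k - pos + 1 = m
      · have hkm : k + 1 = m := by omega
        subst hkm
        rw [if_pos hfull]
        rcases hinv' with ⟨hlbeq, hnb⟩ | ⟨b, hlbeq, hb1, hb2, hbrk, hno⟩
        · rw [hlbeq, dif_neg (by omega : ¬ (0:Int) ≤ -1)]
          rw [pvWrapA_step_nobreak line (k+1) hm pos (by omega) hnb]
          congr 1
          · rw [show ((pos + k : Nat) : Int) + 1 = (pos : Int) + ((k+1 : Nat) : Int) by push_cast; ring]
            rw [pvChunk_eq]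
          · exact ih (pos + (k+1)) 0 (-1) (by omega) (by omega)
              (Or.inl ⟨rfl, fun t h1 h2 => absurd h2 (by omega)⟩)
        · rw [hlbeq, dif_pos (by omega : (0:Int) ≤ ((b:Nat) : Int)), Int.toNat_natCast]
          rw [pvWrapA_step_break line (k+1) hm pos b (by omega) hb1 hb2 hbrk hno]
          congr 1
          · congr 1
            rw [show ((b : Nat) : Int) + 1 = ((b + 1 : Nat) : Int) by push_cast; ring,
              PySem.List.slice_natCast]
            congr 1; omega
          · have hs := pvSkipSpaces_ge line (b + 1)
            have harg : (if pos + k + 1 < pvSkipSpaces line (b + 1) then pvSkipSpaces line (b + 1) - 1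
                else pos + k) + 1
                = pvSkipSpaces line (b + 1) + (pos + k + 1 - pvSkipSpaces line (b + 1)) := by
              split <;> omega
            rw [harg]
            exact ih (pvSkipSpaces line (b + 1)) (pos + k + 1 - pvSkipSpaces line (b + 1)) (-1)
              (by omega) (by omega)
              (Or.inl ⟨rfl, fun t h1 h2 => hno t (by omega) (by omega)⟩)
      · rw [if_neg hfull]
        exact ih pos (k + 1)
          (if pvSplitChars.contains (line.getD (pos + k) ' ') then ((pos + k : Nat) : Int) else lb)
          (by omega) (by omega) hinv'
    · exact pvWrapB_tail line m hm pos k lb hk (by omega)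
-- ===== VERDICT (by name: the statement is the Claim_ definition above) =====
theorem wrap_pre_lines_py_spec : Claim_equal_wrap_pre_lines_py := by
  intro text max_len _
  unfold Spec_wrap_pre_lines_py wrap_pre_lines_py wrap_pre_lines_py_alt
  by_cases h : text = "" ∨ max_len < 1
  · rw [dif_pos h, dif_pos h]
  · rw [dif_neg h, dif_neg h]
    have key : ∀ (line : List Char) (hm' : 0 < max_len.toNat),
        pvWrapLineB line max_len.toNat hm' 0 (-1) 0 = pvWrapLineA line max_len.toNat hm' 0 :=
      fun line hm' => pvWrapB_eq_A line _ hm' line.length 0 0 (-1) (by omega) (by omega)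
        (Or.inl ⟨rfl, fun t h1 h2 => absurd h2 (by omega)⟩)
    dsimp only
    congr 1
    congr 1
    congr 1
    funext acc line
    by_cases hl : (line.length : Int) ≤ max_len
    · rw [if_pos hl, if_pos hl]
    · rw [if_neg hl, if_neg hl, key]
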